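-- pv_equiv track=rewrite | github.com/Mouha7/Gestion-Article-Python | Info.py | create_articles
-- ===== SOURCE A (Python) =====
-- def create_articles(header:list, data_list:list)->list:
--     articles = []
--     for i in range(0, len(data_list), len(header)):
--         article_data = data_list[i:i+len(header)]
--         if len(article_data) == len(header):
--             article_dict = {header[j]: article_data[j] for j in range(len(header))}
--             articles.append(article_dict)
--     return articles
-- ===== SOURCE B (Python) =====
-- def create_articles(header: list, data_list: list) -> list:
--     # grouper idiom: complete n-tuples from one iterator, each zipped with the header
--     return [dict(zip(header, chunk)) for chunk in zip(*[iter(data_list)] * len(header))]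
-- ===== Notes on version B (the rewrite author's own statement) =====
-- stated objective: idiomatic
-- what changed: Replaces the index-range loop with explicit slicing, length guard and a per-field dict comprehension by the standard grouper idiom: zip(*[iter(data_list)]*len(header)) yields exactly the complete chunks and dict(zip(header, chunk)) builds each record.
-- crash fix: On an empty header A raises ValueError (range step 0); B's grouper naturally returns []. — e.g. on create_articles([], ["1", "2"]): A raises ValueError, B returns []
import Mathlib
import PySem

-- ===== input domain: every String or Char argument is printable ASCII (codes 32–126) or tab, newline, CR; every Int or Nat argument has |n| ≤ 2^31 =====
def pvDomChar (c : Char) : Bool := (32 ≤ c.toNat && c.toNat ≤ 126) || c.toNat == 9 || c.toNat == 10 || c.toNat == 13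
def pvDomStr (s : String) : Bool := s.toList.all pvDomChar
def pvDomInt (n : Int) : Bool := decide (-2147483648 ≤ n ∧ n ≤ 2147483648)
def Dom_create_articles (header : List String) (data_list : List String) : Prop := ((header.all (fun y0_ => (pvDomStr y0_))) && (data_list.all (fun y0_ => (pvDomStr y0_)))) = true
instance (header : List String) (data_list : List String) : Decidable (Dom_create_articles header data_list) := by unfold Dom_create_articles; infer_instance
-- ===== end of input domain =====

-- B replaces A's index-range loop + slice + length guard + per-field dict comprehension by the
-- grouper idiom (complete n-chunks, each dict(zip(header, chunk))); objective: idiomatic, same cost.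

-- ===== PORT A =====
-- A-side helper: the loop body (slice, length guard, per-field insert loop)
def pvStep (header xs : List String) (articles : List (List (String × String))) (i : Int) : List (List (String × String)) :=
  let article_data := PySem.List.slice xs (some i) (some (i + (header.length : Int)))
  if article_data.length = header.length then
    articles ++ [((PySem.List.pyRange 0 (header.length : Int) 1).foldl
        (fun d j => d.insert (PySem.List.pyGetD header j "") (PySem.List.pyGetD article_data j ""))
        PySem.Dict.empty).items]
  else articles

def create_articles (header : List String) (data_list : List String) : List (List (String × String)) :=
  (PySem.List.pyRange 0 (data_list.length : Int) (header.length : Int)).foldl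
    (pvStep header data_list) []

-- ===== PORT B =====
-- the grouper zip(*[iter(data_list)]*n) yields exactly (len data)/n complete chunks in order
def pvChunkGo (n : Nat) : Nat → List String → List (List String)
  | 0, _ => []
  | k + 1, xs => xs.take n :: pvChunkGo n k (xs.drop n)

def create_articles_alt (header : List String) (data_list : List String) : List (List (String × String)) :=
  (pvChunkGo header.length (data_list.length / header.length) data_list).map
    (fun chunk => (PySem.Dict.ofList (header.zip chunk)).items)

-- ===== PRECONDITION & SPEC =====
-- Pre_ excludes only the empty header, on which A's range(..., 0) raises ValueError.
def Pre_create_articles (header : List String) (data_list : List String) : Prop := header ≠ []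
instance (header : List String) (data_list : List String) : Decidable (Pre_create_articles header data_list) := by unfold Pre_create_articles; infer_instance
def pvWitness_create_articles : List String × List String := (["id", "name"], ["1", "pen", "2", "ink"])

-- On an empty header A raises ValueError (range step 0); B's grouper naturally returns [].
def Raises_create_articles (header : List String) (data_list : List String) : Prop := header = []
instance (header : List String) (data_list : List String) : Decidable (Raises_create_articles header data_list) := by unfold Raises_create_articles; infer_instance
def pvRaiseWitness_create_articles : List String × List String := ([], ["1", "2"])
def pvRaiseWitnessOut_create_articles : List (List (String × String)) := []

def Spec_create_articles (header : List String) (data_list : List String) (out : List (List (String × String))) : Prop := out = create_articles_alt header data_list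
instance (header : List String) (data_list : List String) (out : List (List (String × String))) : Decidable (Spec_create_articles header data_list out) := by unfold Spec_create_articles; infer_instance

-- ===== CLAIM (what is proved, stated in full; the proofs are below) =====
def Claim_equal_create_articles : Prop := ∀ (header : List String) (data_list : List String), Dom_create_articles header data_list → Pre_create_articles header data_list → Spec_create_articles header data_list (create_articles header data_list)
def Claim_raises_create_articles : Prop := (∀ (header : List String) (data_list : List String), Dom_create_articles header data_list → Raises_create_articles header data_list → ¬ Pre_create_articles header data_list) ∧ (Dom_create_articles (pvRaiseWitness_create_articles.1) (pvRaiseWitness_create_articles.2) ∧ Raises_create_articles (pvRaiseWitness_create_articles.1) (pvRaiseWitness_create_articles.2) ∧ create_articles_alt (pvRaiseWitness_create_articles.1) (pvRaiseWitness_create_articles.2) = pvRaiseWitnessOut_create_articles)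

-- ===== LEMMAS AND PROOFS =====

-- range(a, b, s) for 0 < s: nil and cons forms
lemma pvRange_nil_pos {a b s : Int} (hs : 0 < s) (hab : b ≤ a) :
    PySem.List.pyRange a b s = [] := by
  rw [PySem.List.pyRange_of_pos a b hs]
  simp [show ¬ a < b by omega]

lemma pvRange_cons_pos {a b s : Int} (hs : 0 < s) (hab : a < b) :
    PySem.List.pyRange a b s = a :: PySem.List.pyRange (a + s) b s := by
  rw [PySem.List.pyRange_of_pos a b hs, PySem.List.pyRange_of_pos (a + s) b hs]
  have hkey : b - a + s - 1 = (b - (a + s) + s - 1) + 1 * s := by ring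
  have hm : ((b - a + s - 1) / s).toNat
      = (if a + s < b then ((b - (a + s) + s - 1) / s).toNat else 0) + 1 := by
    rw [hkey, Int.add_mul_ediv_right _ _ (by omega : s ≠ 0)]
    by_cases hc : a + s < b
    · have h0 : 0 ≤ (b - (a + s) + s - 1) / s :=
        Int.ediv_nonneg (by omega) (by omega)
      simp [hc]; omega
    · have h0 : (b - (a + s) + s - 1) / s = 0 :=
        Int.ediv_eq_zero_of_lt (by omega) (by omega)
      simp [hc, h0]
  rw [if_pos hab, hm, List.range_succ_eq_map]
  simp only [List.map_cons, List.map_map]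
  congr 1
  · simp
  · exact List.map_congr_left (fun k _ => by simp [Function.comp]; ring)

lemma pvRange_shift {b s : Int} (hs : 0 < s) :
    PySem.List.pyRange s b s = (PySem.List.pyRange 0 (b - s) s).map (· + s) := by
  rw [PySem.List.pyRange_of_pos s b hs, PySem.List.pyRange_of_pos 0 (b - s) hs, List.map_map]
  have hm : (if s < b then ((b - s + s - 1) / s).toNat else 0)
      = (if 0 < b - s then ((b - s - 0 + s - 1) / s).toNat else 0) := by
    by_cases hc : s < b
    · rw [if_pos hc, if_pos (by omega)]
      congr 2
      ring
    · rw [if_neg hc, if_neg (by omega)]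
  rw [hm]
  exact List.map_congr_left (fun k _ => by simp [Function.comp]; ring)

-- the index comprehension over zipped positions IS the zip
lemma pvRangeMap_zip (hd ck : List String) (h : ck.length = hd.length) :
    (PySem.List.pyRange 0 (hd.length : Int) 1).map
      (fun j => (PySem.List.pyGetD hd j "", PySem.List.pyGetD ck j "")) = hd.zip ck := by
  apply List.ext_getElem
  · simp [PySem.List.length_pyRange_one, h]
  · intro i h1 h2
    have hi : i < hd.length := by
      simpa [PySem.List.length_pyRange_one] using h1
    rw [List.getElem_map, PySem.List.getElem_pyRange_one, List.getElem_zip]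
    rw [PySem.List.pyGetD_eq_getElem hd _ (by omega) (by omega)]
    rw [PySem.List.pyGetD_eq_getElem ck _ (by omega) (by omega)]
    simp

-- A's per-field insert loop builds dict(zip(header, chunk))
lemma pvInnerDict (header chunk : List String) (h : chunk.length = header.length) :
    (PySem.List.pyRange 0 (header.length : Int) 1).foldl
      (fun d j => d.insert (PySem.List.pyGetD header j "") (PySem.List.pyGetD chunk j ""))
      PySem.Dict.empty
    = PySem.Dict.ofList (header.zip chunk) := by
  rw [← pvRangeMap_zip header chunk h]
  have hof : ∀ l : List (String × String), PySem.Dict.ofList l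
      = l.foldl (fun d p => d.insert p.1 p.2) PySem.Dict.empty := fun l => rfl
  rw [hof, List.foldl_map]

-- the loop invariant: A's fold over starts 0, n, 2n, … collects exactly the complete chunks
lemma pvStep_shift (header xs : List String) (acc : List (List (String × String))) (i : Int) (hi : 0 ≤ i) :
    pvStep header xs acc (i + (header.length : Int)) = pvStep header (xs.drop header.length) acc i := by
  have hslice : PySem.List.slice xs (some (i + (header.length : Int)))
        (some (i + (header.length : Int) + (header.length : Int)))
      = PySem.List.slice (xs.drop header.length) (some i) (some (i + (header.length : Int))) := by
    rw [PySem.List.slice_toNat xs (by omega) (by omega),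
        PySem.List.slice_toNat (xs.drop header.length) (by omega) (by omega), List.drop_drop]
    congr 1
    · omega
    · congr 1
      omega
  unfold pvStep
  rw [hslice]

lemma pvLoop (header : List String) (hh : 0 < header.length) :
    ∀ (fuel : Nat) (xs : List String), xs.length ≤ fuel →
    ∀ acc : List (List (String × String)),
      (PySem.List.pyRange 0 (xs.length : Int) (header.length : Int)).foldl (pvStep header xs) acc
      = acc ++ (pvChunkGo header.length (xs.length / header.length) xs).map
          (fun chunk => (PySem.Dict.ofList (header.zip chunk)).items) := by
  have hsI : (0 : Int) < (header.length : Int) := by exact_mod_cast hh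
  intro fuel
  induction fuel with
  | zero =>
    intro xs hx acc
    have hxs : xs = [] := List.eq_nil_of_length_eq_zero (by omega)
    subst hxs
    simp [pvRange_nil_pos hsI (le_refl 0), pvChunkGo]
  | succ n ih =>
    intro xs hx acc
    by_cases hge : header.length ≤ xs.length
    · -- a complete chunk at the front
      have hlt : (0 : Int) < (xs.length : Int) := by exact_mod_cast Nat.lt_of_lt_of_le hh hge
      rw [pvRange_cons_pos hsI hlt, List.foldl_cons]
      -- first iteration appends the dict of the first chunk
      have hslice : PySem.List.slice xs (some 0) (some (0 + (header.length : Int)))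
          = xs.take header.length := by
        rw [PySem.List.slice_toNat xs (by omega) (by omega)]
        simp
      have htk : (xs.take header.length).length = header.length := by
        simp [hge]
      have hstep0 : pvStep header xs acc 0
          = acc ++ [(PySem.Dict.ofList (header.zip (xs.take header.length))).items] := by
        unfold pvStep
        rw [hslice]
        rw [if_pos htk, pvInnerDict header _ htk]
      rw [hstep0]
      -- remaining iterations are the loop on the rest of the data
      have hshift : PySem.List.pyRange (0 + (header.length : Int)) (xs.length : Int) (header.length : Int)
          = (PySem.List.pyRange 0 ((xs.length : Int) - (header.length : Int)) (header.length : Int)).map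
              (· + (header.length : Int)) := by
        rw [zero_add, pvRange_shift hsI]
      rw [hshift, List.foldl_map]
      rw [PySem.List.foldl_congr_mem _ _ (pvStep header (xs.drop header.length)) _
        (fun acc2 i hi => pvStep_shift header xs acc2 i
          ((PySem.List.mem_pyRange_iff_of_pos hsI i).mp hi).1)]
      have hlen : ((xs.length : Int) - (header.length : Int)) = ((xs.drop header.length).length : Int) := by
        simp
        omega
      rw [hlen, ih (xs.drop header.length) (by simp; omega)]
      have hdiv : xs.length / header.length = (xs.drop header.length).length / header.length + 1 := by
        rw [List.length_drop]
        rw [Nat.div_eq_sub_div hh hge]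
      rw [hdiv]
      simp [pvChunkGo]
    · -- fewer than len(header) items left: nothing is appended
      by_cases h0 : xs.length = 0
      · have hxs : xs = [] := List.eq_nil_of_length_eq_zero h0
        subst hxs
        simp [pvRange_nil_pos hsI (le_refl 0), pvChunkGo]
      · have hlt : (0 : Int) < (xs.length : Int) := by exact_mod_cast Nat.pos_of_ne_zero h0
        rw [pvRange_cons_pos hsI hlt, List.foldl_cons,
            pvRange_nil_pos hsI (by omega), List.foldl_nil]
        have hstep0 : pvStep header xs acc 0 = acc := by
          unfold pvStep
          rw [PySem.List.slice_toNat xs (by omega) (by omega)]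
          simp
          omega
        rw [hstep0, Nat.div_eq_of_lt (by omega)]
        simp [pvChunkGo]

-- ===== VERDICT (by name: the statement is the Claim_ definition above) =====
theorem create_articles_spec : Claim_equal_create_articles := by
  intro header data_list _ hpre
  unfold Spec_create_articles create_articles create_articles_alt
  have hh : 0 < header.length := List.length_pos_of_ne_nil hpre
  simpa using pvLoop header hh data_list.length data_list (le_refl _) []

@[simp] theorem create_articles_raises : Claim_raises_create_articles := by
  unfold Claim_raises_create_articles
  exact ⟨fun h d _ hr hp => hp hr, by decide⟩
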